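-- pv_equiv track=rewrite | github.com/hltdi/HornMorpho | src/hm/um.py | filter_lexvalfeats
-- ===== SOURCE A (Python) =====
-- def filter_lexvalfeats(lexfeats, lexval):
--     '''
--     Each of lexfeats is root, gloss, feats (all roots the same).
--     lexval is one of smp, ps, cs, etc.
--     '''
--     if lexval == 'smp':
--         # prefer vc=ps over other values
--         ps = None
--         empty = None
--         other = []
--         for root, gloss, feats in lexfeats:
--             if feats == 'vc=ps':
--                 ps = root, gloss, feats
--             elif feats == '':
--                 empty = root, gloss, feats
--             else:
--                 other.append((root, gloss, feats))
--         if empty and other: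
--             return [empty]
--         elif ps and other:
--             return [ps]
--
--     return lexfeats
-- ===== SOURCE B (Python) =====
-- def filter_lexvalfeats(lexfeats, lexval):
--     '''
--     Each of lexfeats is root, gloss, feats (all roots the same).
--     lexval is one of smp, ps, cs, etc.
--     '''
--     if lexval != 'smp':
--         return lexfeats
--     if not any(e[2] not in ('vc=ps', '') for e in lexfeats):
--         return lexfeats
--     chosen = next((e for e in reversed(lexfeats) if e[2] == ''), None)
--     if chosen is None:
--         chosen = next((e for e in reversed(lexfeats) if e[2] == 'vc=ps'), None)
--     return [chosen] if chosen is not None else lexfeats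
-- ===== Notes on version B (the rewrite author's own statement) =====
-- stated objective: simpler
-- what changed: Replaces A's single three-way classifying loop with accumulators by an any-presence test plus last-match searches over the reversed list (next/reversed), selecting directly the entry to return.
import Mathlib
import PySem

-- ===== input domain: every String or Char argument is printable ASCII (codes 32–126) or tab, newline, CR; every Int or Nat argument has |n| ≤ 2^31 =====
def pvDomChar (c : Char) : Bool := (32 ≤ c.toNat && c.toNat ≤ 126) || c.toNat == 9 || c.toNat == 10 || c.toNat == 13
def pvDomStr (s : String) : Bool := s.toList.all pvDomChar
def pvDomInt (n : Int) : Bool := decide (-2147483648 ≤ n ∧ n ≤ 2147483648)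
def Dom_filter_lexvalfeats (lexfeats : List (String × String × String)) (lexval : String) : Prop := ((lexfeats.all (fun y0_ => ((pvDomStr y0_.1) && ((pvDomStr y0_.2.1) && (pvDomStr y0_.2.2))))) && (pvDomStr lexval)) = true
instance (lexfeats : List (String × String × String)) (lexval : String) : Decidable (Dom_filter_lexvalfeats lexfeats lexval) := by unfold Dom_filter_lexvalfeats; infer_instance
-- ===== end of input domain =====

-- B replaces A's single three-way classifying loop by an any-presence test plus
-- last-match searches over the reversed list (objective: simpler decomposition).

-- ===== PORT A =====
-- one step of A's loop over (ps, empty, other)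
def pvStepA (s : Option (String × String × String) × Option (String × String × String) × List (String × String × String))
    (x : String × String × String) :
    Option (String × String × String) × Option (String × String × String) × List (String × String × String) :=
  if x.2.2 == "vc=ps" then (some x, s.2.1, s.2.2)
  else if x.2.2 == "" then (s.1, some x, s.2.2)
  else (s.1, s.2.1, s.2.2 ++ [x])

def filter_lexvalfeats (lexfeats : List (String × String × String)) (lexval : String) : List (String × String × String) :=
  if lexval == "smp" then
    let s := lexfeats.foldl pvStepA (none, none, [])
    -- `if empty and other: return [empty]` (a 3-tuple is always truthy when present)
    match s.2.1, s.1, s.2.2 with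
    | some e, _, _ :: _ => [e]
    | none, some p, _ :: _ => [p]
    | _, _, _ => lexfeats
  else lexfeats

-- ===== PORT B =====
def filter_lexvalfeats_alt (lexfeats : List (String × String × String)) (lexval : String) : List (String × String × String) :=
  if lexval != "smp" then lexfeats
  else if !(lexfeats.any (fun e => !(e.2.2 == "vc=ps") && !(e.2.2 == ""))) then lexfeats
  else
    match lexfeats.reverse.find? (fun e => e.2.2 == "") with
    | some c => [c]
    | none =>
      match lexfeats.reverse.find? (fun e => e.2.2 == "vc=ps") with
      | some c => [c]
      | none => lexfeats

-- ===== PRECONDITION & SPEC =====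
def Spec_filter_lexvalfeats (lexfeats : List (String × String × String)) (lexval : String) (out : List (String × String × String)) : Prop := out = filter_lexvalfeats_alt lexfeats lexval
instance (lexfeats : List (String × String × String)) (lexval : String) (out : List (String × String × String)) : Decidable (Spec_filter_lexvalfeats lexfeats lexval out) := by unfold Spec_filter_lexvalfeats; infer_instance

-- ===== CLAIM (what is proved, stated in full; the proofs are below) =====
def Claim_equal_filter_lexvalfeats : Prop := ∀ (lexfeats : List (String × String × String)) (lexval : String), Dom_filter_lexvalfeats lexfeats lexval → Spec_filter_lexvalfeats lexfeats lexval (filter_lexvalfeats lexfeats lexval)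

-- ===== LEMMAS AND PROOFS =====

-- A's loop state, characterised: ps/empty are the last matches, other is the filter.
theorem foldl_stepA (xs : List (String × String × String))
    (p e : Option (String × String × String)) (o : List (String × String × String)) :
    xs.foldl pvStepA (p, e, o) =
      ((xs.reverse.find? (fun x => x.2.2 == "vc=ps")).or p,
       (xs.reverse.find? (fun x => x.2.2 == "")).or e,
       o ++ xs.filter (fun x => !(x.2.2 == "vc=ps") && !(x.2.2 == ""))) := by
  induction xs generalizing p e o with
  | nil => simp
  | cons x xs ih =>
    simp only [List.foldl_cons, List.reverse_cons, List.find?_append, List.filter_cons, pvStepA]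
    by_cases h1 : x.2.2 = "vc=ps"
    · simp [h1, ih]
    · by_cases h2 : x.2.2 = ""
      · simp [h2, ih]
      · simp [h1, h2, ih]

theorem filter_lexvalfeats_spec : Claim_equal_filter_lexvalfeats := by
  intro lexfeats lexval _
  unfold Spec_filter_lexvalfeats filter_lexvalfeats filter_lexvalfeats_alt
  by_cases hv : lexval = "smp"
  · simp only [hv, beq_self_eq_true, if_pos, bne_self_eq_false, Bool.false_eq_true, if_false,
      foldl_stepA, Option.or_none, List.nil_append]
    rcases hf : lexfeats.filter (fun x => !(x.2.2 == "vc=ps") && !(x.2.2 == "")) with _ | ⟨y, ys⟩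
    · have : lexfeats.any (fun e => !(e.2.2 == "vc=ps") && !(e.2.2 == "")) = false := by
        simp only [List.any_eq_false]
        intro a ha
        simpa using List.filter_eq_nil_iff.mp hf a ha
      simp only [this, Bool.not_false, if_pos]
      rw [hf]
      cases lexfeats.reverse.find? (fun x => x.2.2 == "") <;>
        cases lexfeats.reverse.find? (fun x => x.2.2 == "vc=ps") <;> rfl
    · have : lexfeats.any (fun e => !(e.2.2 == "vc=ps") && !(e.2.2 == "")) = true := by
        have hy : y ∈ lexfeats.filter (fun x => !(x.2.2 == "vc=ps") && !(x.2.2 == "")) := by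
          rw [hf]; exact List.mem_cons_self
        rw [List.mem_filter] at hy
        exact List.any_eq_true.mpr ⟨y, hy.1, hy.2⟩
      simp only [this, Bool.not_true, Bool.false_eq_true, if_false]
      rw [hf]
      cases lexfeats.reverse.find? (fun x => x.2.2 == "") with
      | some c => rfl
      | none =>
        cases lexfeats.reverse.find? (fun x => x.2.2 == "vc=ps") with
        | some c => rfl
        | none => rfl
  · simp [hv]
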